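-- pv_equiv track=rewrite | github.com/RomeroBarata/hierarchical_action_prediction | fpua/data/hera.py | add_padder_actions_and_lens
-- ===== SOURCE A (Python) =====
-- def add_padder_actions_and_lens(actions, lengths):
--     actions_copy, lengths_copy = list(actions), list(lengths)
--     already_inserted = 0
--     for i in range(1, len(actions)):
--         curr_coarse_action, prev_coarse_action = actions[i][0], actions[i - 1][0]
--         if curr_coarse_action != prev_coarse_action:
--             actions_copy.insert(i + already_inserted, (curr_coarse_action, None))
--             lengths_copy.insert(i + already_inserted, 0)
--             already_inserted += 1
--     actions_copy.append((None, None))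
--     lengths_copy.append(0)
--     return actions_copy, lengths_copy
-- ===== SOURCE B (Python) =====
-- def add_padder_actions_and_lens(actions, lengths):
--     new_actions, new_lengths = [], []
--     prev_coarse = None
--     for i, act in enumerate(actions):
--         if new_actions and act[0] != prev_coarse:
--             new_actions.append((act[0], None))
--             new_lengths.append(0)
--         new_actions.append(act)
--         if i < len(lengths):
--             new_lengths.append(lengths[i])
--         prev_coarse = act[0]
--     new_lengths.extend(lengths[len(actions):])
--     new_actions.append((None, None))
--     new_lengths.append(0)
--     return new_actions, new_lengths
-- ===== Notes on version B (the rewrite author's own statement) =====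
-- stated objective: alternative
-- what changed: Replaces A's in-place list.insert calls at offset-corrected positions (tracked by an already_inserted counter) with a single streaming pass that appends a padder at each coarse-action change while emitting actions and their parallel lengths, then flushes any leftover lengths.
import Mathlib
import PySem

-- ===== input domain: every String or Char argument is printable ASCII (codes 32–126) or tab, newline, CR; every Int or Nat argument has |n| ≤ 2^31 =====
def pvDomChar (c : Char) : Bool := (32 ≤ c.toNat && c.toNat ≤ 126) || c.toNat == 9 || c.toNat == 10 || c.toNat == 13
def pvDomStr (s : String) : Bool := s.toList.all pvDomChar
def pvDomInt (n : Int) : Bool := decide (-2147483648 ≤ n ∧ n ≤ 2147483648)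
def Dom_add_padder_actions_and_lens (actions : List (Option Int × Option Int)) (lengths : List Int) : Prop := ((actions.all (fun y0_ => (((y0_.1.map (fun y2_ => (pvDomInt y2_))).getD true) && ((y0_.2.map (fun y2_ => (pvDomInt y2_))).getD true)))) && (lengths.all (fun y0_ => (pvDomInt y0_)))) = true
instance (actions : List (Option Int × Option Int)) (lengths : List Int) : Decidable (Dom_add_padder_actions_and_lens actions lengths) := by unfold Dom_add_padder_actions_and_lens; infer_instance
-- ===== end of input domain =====

-- B replaces A's offset-tracked in-place inserts by one streaming append pass (objective: alternative; same values on every input).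

-- ===== PORT A =====
-- literal transliteration of A: copies, a range(1, len) loop, list.insert at i + already_inserted.
-- actions[i] / actions[i-1] are always in range for i in range(1, len(actions)), so pyGetD's default is never used.
def add_padder_actions_and_lens (actions : List (Option Int × Option Int)) (lengths : List Int) : (List (Option Int × Option Int)) × List Int :=
  let st := (PySem.List.pyRange 1 (actions.length : Int) 1).foldl
    (fun st i =>
      let curr_coarse_action := (PySem.List.pyGetD actions i ((none : Option Int), (none : Option Int))).1
      let prev_coarse_action := (PySem.List.pyGetD actions (i - 1) ((none : Option Int), (none : Option Int))).1
      if curr_coarse_action ≠ prev_coarse_action then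
        (PySem.List.insert st.1 (i + st.2.2) (curr_coarse_action, (none : Option Int)),
         PySem.List.insert st.2.1 (i + st.2.2) (0 : Int),
         st.2.2 + 1)
      else st)
    (actions, lengths, (0 : Int))
  (st.1 ++ [((none : Option Int), (none : Option Int))], st.2.1 ++ [(0 : Int)])

-- ===== PORT B =====
-- literal transliteration of Source B: one fold over enumerate(actions) with output accumulators and prev_coarse,
-- then the leftover lengths tail (lengths[len(actions):]) and the sentinel.
def add_padder_actions_and_lens_alt (actions : List (Option Int × Option Int)) (lengths : List Int) : (List (Option Int × Option Int)) × List Int :=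
  let st := (PySem.List.enumerate actions 0).foldl
    (fun st p =>
      let i := p.1
      let act := p.2
      let pair :=
        if st.1 ≠ [] ∧ act.1 ≠ st.2.2 then
          (st.1 ++ [(act.1, (none : Option Int))], st.2.1 ++ [(0 : Int)])
        else (st.1, st.2.1)
      let nl := if i < (lengths.length : Int) then pair.2 ++ [PySem.List.pyGetD lengths i (0 : Int)] else pair.2
      (pair.1 ++ [act], nl, act.1))
    (([] : List (Option Int × Option Int)), ([] : List Int), (none : Option Int))
  (st.1 ++ [((none : Option Int), (none : Option Int))],
   (st.2.1 ++ PySem.List.slice lengths (some (actions.length : Int)) none) ++ [(0 : Int)])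

-- ===== PRECONDITION & SPEC =====
-- A is total (list.insert clamps past-the-end positions), so there is no Pre_.
def Spec_add_padder_actions_and_lens (actions : List (Option Int × Option Int)) (lengths : List Int) (out : (List (Option Int × Option Int)) × List Int) : Prop := out = add_padder_actions_and_lens_alt actions lengths
instance (actions : List (Option Int × Option Int)) (lengths : List Int) (out : (List (Option Int × Option Int)) × List Int) : Decidable (Spec_add_padder_actions_and_lens actions lengths out) := by unfold Spec_add_padder_actions_and_lens; infer_instance

-- ===== CLAIM (what is proved, stated in full; the proofs are below) =====
def Claim_equal_add_padder_actions_and_lens : Prop := ∀ (actions : List (Option Int × Option Int)) (lengths : List Int), Dom_add_padder_actions_and_lens actions lengths → Spec_add_padder_actions_and_lens actions lengths (add_padder_actions_and_lens actions lengths)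

-- ===== LEMMAS AND PROOFS =====

-- Intended actions output of the loop: a padder before each coarse-action change.
def padA (prev : Option Int) : List (Option Int × Option Int) → List (Option Int × Option Int)
  | [] => []
  | b :: r => if b.1 ≠ prev then (b.1, none) :: b :: padA b.1 r else b :: padA b.1 r

-- Lengths output of A's loop: zeros interleaved into the (possibly shorter or longer) lengths list.
def padL (prev : Option Int) : List (Option Int × Option Int) → List Int → List Int
  | [], restl => restl
  | b :: r, [] => if b.1 ≠ prev then 0 :: padL b.1 r [] else padL b.1 r []
  | b :: r, l :: rl => if b.1 ≠ prev then 0 :: l :: padL b.1 r rl else l :: padL b.1 r rl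

-- Lengths output of B's loop: as padL but without the leftover lengths tail.
def padLB (prev : Option Int) : List (Option Int × Option Int) → List Int → List Int
  | [], _ => []
  | b :: r, [] => if b.1 ≠ prev then 0 :: padLB b.1 r [] else padLB b.1 r []
  | b :: r, l :: rl => if b.1 ≠ prev then 0 :: l :: padLB b.1 r rl else l :: padLB b.1 r rl

theorem padL_eq_padLB (rest : List (Option Int × Option Int)) :
    ∀ (prev : Option Int) (restl : List Int),
    padL prev rest restl = padLB prev rest restl ++ restl.drop rest.length := by
  induction rest with
  | nil => intro prev restl; simp [padL, padLB]
  | cons b r ih =>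
    intro prev restl
    cases restl with
    | nil => simp only [padL, padLB]; split <;> simp [ih, List.drop_nil]
    | cons l rl => simp only [padL, padLB]; split <;> simp [ih]

-- Python's list.insert clamps a past-the-end position to an append.
theorem pyInsert_of_le {α : Type} (xs : List α) (p : Nat) (v : α) (h : xs.length ≤ p) :
    PySem.List.insert xs (p : Int) v = xs ++ [v] := by
  have hif : (if (p:Int) < 0 then max ((p:Int) + xs.length) 0 else min (p:Int) xs.length) = (xs.length : Int) := by omega
  simp [PySem.List.insert, PySem.List.sliceIndices, hif]

theorem loopA (rest : List (Option Int × Option Int)) :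
    ∀ (front : List (Option Int × Option Int)) (a : Option Int × Option Int)
      (P : List (Option Int × Option Int)) (Q restl : List Int),
    (restl = [] → Q.length ≤ P.length) → (restl ≠ [] → Q.length = P.length) →
    (PySem.List.pyRange ((front.length : Int) + 1) ((front.length : Int) + 1 + rest.length) 1).foldl
      (fun st i =>
        let curr_coarse_action := (PySem.List.pyGetD (front ++ a :: rest) i ((none : Option Int), (none : Option Int))).1
        let prev_coarse_action := (PySem.List.pyGetD (front ++ a :: rest) (i - 1) ((none : Option Int), (none : Option Int))).1
        if curr_coarse_action ≠ prev_coarse_action then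
          (PySem.List.insert st.1 (i + st.2.2) (curr_coarse_action, (none : Option Int)),
           PySem.List.insert st.2.1 (i + st.2.2) (0 : Int),
           st.2.2 + 1)
        else st)
      (P ++ rest, Q ++ restl, (P.length : Int) - ((front.length : Int) + 1))
    = (P ++ padA a.1 rest, Q ++ padL a.1 rest restl,
       (P.length : Int) + ((padA a.1 rest).length : Int) - ((front.length : Int) + 1 + rest.length)) := by
  induction rest with
  | nil =>
    intro front a P Q restl h1 h2
    rw [PySem.List.pyRange_one_eq_nil (by simp)]
    simp [padA, padL]
  | cons b r ih =>
    intro front a P Q restl h1 h2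
    rw [PySem.List.pyRange_one_cons (by simp only [List.length_cons]; push_cast; omega)]
    have hget1 : PySem.List.pyGetD (front ++ a :: b :: r) ((front.length:Int)+1) ((none:Option Int),(none:Option Int)) = b := by
      rw [show ((front.length:Int)+1) = ((front.length+1 : Nat) : Int) by push_cast; ring]
      rw [PySem.List.pyGetD_natCast]
      simp [List.getD]
    have hget0 : PySem.List.pyGetD (front ++ a :: b :: r) ((front.length:Int)+1-1) ((none:Option Int),(none:Option Int)) = a := by
      rw [show ((front.length:Int)+1-1) = ((front.length : Nat) : Int) by push_cast; ring]
      rw [PySem.List.pyGetD_natCast]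
      simp [List.getD]
    rw [List.foldl_cons]
    by_cases h : b.1 = a.1
    · -- no padder at this position
      simp only [hget1, hget0, h, ne_eq, not_true_eq_false, if_false]
      have hpa : padA a.1 (b::r) = b :: padA b.1 r := by simp [padA, h]
      cases restl with
      | nil =>
        have hIH := ih (front ++ [a]) b (P ++ [b]) Q []
          (fun _ => by have hq := h1 rfl; simp only [List.length_append, List.length_cons, List.length_nil]; omega)
          (fun hc => absurd rfl hc)
        have hpl : padL a.1 (b::r) [] = padL b.1 r [] := by simp [padL, h]
        simp only [List.append_assoc, List.cons_append, List.nil_append, List.append_nil,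
          List.length_append, List.length_cons, List.length_nil] at hIH ⊢
        simp only [hpa, hpl, List.length_cons]
        simp only [ne_eq] at hIH
        push_cast at hIH ⊢
        ring_nf at hIH ⊢
        exact hIH
      | cons l rl =>
        have hQ : Q.length = P.length := h2 (by simp)
        have hIH := ih (front ++ [a]) b (P ++ [b]) (Q ++ [l]) rl
          (fun _ => by simp [hQ]) (fun _ => by simp [hQ])
        have hpl : padL a.1 (b::r) (l :: rl) = l :: padL b.1 r rl := by simp [padL, h]
        simp only [List.append_assoc, List.cons_append, List.nil_append,
          List.length_append, List.length_cons, List.length_nil] at hIH ⊢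
        simp only [hpa, hpl, List.length_cons]
        simp only [ne_eq] at hIH
        push_cast at hIH ⊢
        ring_nf at hIH ⊢
        exact hIH
    · -- padder inserted before this position
      simp only [hget1, hget0, ne_eq, h, not_false_eq_true, if_true]
      have hpos : (front.length:Int) + 1 + (((P.length:Int)) - ((front.length:Int)+1)) = ((P.length : Nat) : Int) := by ring
      have hinsA : PySem.List.insert (P ++ b :: r) ((P.length:Nat):Int) (b.1, (none : Option Int)) = P ++ (b.1, (none : Option Int)) :: b :: r := by
        rw [PySem.List.insert_natCast _ P.length _ (by simp)]
        simp
      have hpa : padA a.1 (b::r) = (b.1, none) :: b :: padA b.1 r := by simp [padA, h]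
      rw [hpos, hinsA]
      cases restl with
      | nil =>
        have hinsQ : PySem.List.insert (Q ++ []) ((P.length:Nat):Int) (0:Int) = Q ++ [(0:Int)] := by
          rw [List.append_nil, pyInsert_of_le _ _ _ (h1 rfl)]
        rw [hinsQ]
        have hIH := ih (front ++ [a]) b (P ++ [(b.1, (none : Option Int)), b]) (Q ++ [(0:Int)]) []
          (fun _ => by have hq := h1 rfl; simp only [List.length_append, List.length_cons, List.length_nil]; omega)
          (fun hc => absurd rfl hc)
        have hpl : padL a.1 (b::r) [] = 0 :: padL b.1 r [] := by simp [padL, h]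
        simp only [List.append_assoc, List.cons_append, List.nil_append, List.append_nil,
          List.length_append, List.length_cons, List.length_nil] at hIH ⊢
        simp only [hpa, hpl, List.length_cons]
        simp only [ne_eq] at hIH
        push_cast at hIH ⊢
        ring_nf at hIH ⊢
        exact hIH
      | cons l rl =>
        have hQ : Q.length = P.length := h2 (by simp)
        have hinsQ : PySem.List.insert (Q ++ l :: rl) ((P.length:Nat):Int) (0:Int) = Q ++ (0:Int) :: l :: rl := by
          rw [show ((P.length:Nat):Int) = ((Q.length:Nat):Int) by rw [hQ]]
          rw [PySem.List.insert_natCast _ Q.length _ (by simp)]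
          simp
        rw [hinsQ]
        have hIH := ih (front ++ [a]) b (P ++ [(b.1, (none : Option Int)), b]) (Q ++ [(0:Int), l]) rl
          (fun _ => by simp [hQ]) (fun _ => by simp [hQ])
        have hpl : padL a.1 (b::r) (l :: rl) = 0 :: l :: padL b.1 r rl := by simp [padL, h]
        simp only [List.append_assoc, List.cons_append, List.nil_append,
          List.length_append, List.length_cons, List.length_nil] at hIH ⊢
        simp only [hpa, hpl, List.length_cons]
        simp only [ne_eq] at hIH
        push_cast at hIH ⊢
        ring_nf at hIH ⊢
        exact hIH

theorem loopB (lengths : List Int) (rest : List (Option Int × Option Int)) :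
    ∀ (k : Nat) (na : List (Option Int × Option Int)) (nl : List Int) (prev : Option Int), na ≠ [] →
    (PySem.List.enumerate rest (k : Int)).foldl
      (fun st p =>
        let i := p.1
        let act := p.2
        let pair :=
          if st.1 ≠ [] ∧ act.1 ≠ st.2.2 then
            (st.1 ++ [(act.1, (none : Option Int))], st.2.1 ++ [(0 : Int)])
          else (st.1, st.2.1)
        let nl := if i < (lengths.length : Int) then pair.2 ++ [PySem.List.pyGetD lengths i (0 : Int)] else pair.2
        (pair.1 ++ [act], nl, act.1))
      (na, nl, prev)
    = (na ++ padA prev rest, nl ++ padLB prev rest (lengths.drop k),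
       rest.foldl (fun _ b => b.1) prev) := by
  induction rest with
  | nil => intro k na nl prev _; simp [padA, padLB]
  | cons b r ih =>
    intro k na nl prev hna
    rw [PySem.List.enumerate_cons, List.foldl_cons]
    simp only [ne_eq] at ih ⊢
    by_cases hk : k < lengths.length
    · have hcond : ((k:Int) < (lengths.length : Int)) := by push_cast; omega
      have hgetl : PySem.List.pyGetD lengths (k : Int) (0:Int) = lengths[k] := by
        rw [PySem.List.pyGetD_natCast]; exact List.getD_eq_getElem _ _ hk
      have hdrop : lengths.drop k = lengths[k] :: lengths.drop (k+1) :=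
        List.drop_eq_getElem_cons hk
      by_cases h : b.1 = prev
      · subst h
        simp only [not_true_eq_false, and_false, if_false, if_pos hcond, hgetl]
        rw [show (k:Int) + 1 = ((k+1 : Nat) : Int) by push_cast; ring]
        rw [ih (k+1) (na ++ [b]) (nl ++ [lengths[k]]) b.1 (by simp)]
        have hpa : padA b.1 (b::r) = b :: padA b.1 r := by simp [padA]
        have hplb : padLB b.1 (b::r) (lengths.drop k) = lengths[k] :: padLB b.1 r (lengths.drop (k+1)) := by
          rw [hdrop]; simp [padLB]
        simp [hpa, hplb]
      · have hc : (¬ na = [] ∧ ¬ b.1 = prev) := ⟨hna, h⟩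
        rw [if_pos hc, if_pos hcond]
        simp only [hgetl]
        rw [show (k:Int) + 1 = ((k+1 : Nat) : Int) by push_cast; ring]
        rw [show ((na ++ [(b.1, (none : Option Int))], nl ++ [(0:Int)]).1 ++ [b] : List (Option Int × Option Int)) = na ++ [(b.1, (none : Option Int))] ++ [b] from rfl,
            show ((na ++ [(b.1, (none : Option Int))], nl ++ [(0:Int)]).2 ++ [lengths[k]] : List Int) = nl ++ [(0:Int)] ++ [lengths[k]] from rfl]
        rw [ih (k+1) (na ++ [(b.1, (none : Option Int))] ++ [b]) (nl ++ [(0:Int)] ++ [lengths[k]]) b.1 (by simp)]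
        have hpa : padA prev (b::r) = (b.1, none) :: b :: padA b.1 r := by simp [padA, h]
        have hplb : padLB prev (b::r) (lengths.drop k) = 0 :: lengths[k] :: padLB b.1 r (lengths.drop (k+1)) := by
          rw [hdrop]; simp [padLB, h]
        simp [hpa, hplb]
    · have hcond : ¬ ((k:Int) < (lengths.length : Int)) := by push_cast; omega
      have hdrop : lengths.drop k = [] := List.drop_eq_nil_of_le (by omega)
      have hdrop1 : lengths.drop (k+1) = [] := List.drop_eq_nil_of_le (by omega)
      by_cases h : b.1 = prev
      · subst h
        simp only [not_true_eq_false, and_false, if_false, if_neg hcond]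
        rw [show (k:Int) + 1 = ((k+1 : Nat) : Int) by push_cast; ring]
        rw [ih (k+1) (na ++ [b]) nl b.1 (by simp)]
        have hpa : padA b.1 (b::r) = b :: padA b.1 r := by simp [padA]
        have hplb : padLB b.1 (b::r) (lengths.drop k) = padLB b.1 r (lengths.drop (k+1)) := by
          rw [hdrop, hdrop1]; simp [padLB]
        simp [hpa, hplb]
      · have hc : (¬ na = [] ∧ ¬ b.1 = prev) := ⟨hna, h⟩
        rw [if_pos hc, if_neg hcond]
        rw [show (k:Int) + 1 = ((k+1 : Nat) : Int) by push_cast; ring]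
        rw [show ((na ++ [(b.1, (none : Option Int))], nl ++ [(0:Int)]).1 ++ [b] : List (Option Int × Option Int)) = na ++ [(b.1, (none : Option Int))] ++ [b] from rfl,
            show ((na ++ [(b.1, (none : Option Int))], nl ++ [(0:Int)]).2 : List Int) = nl ++ [(0:Int)] from rfl]
        rw [ih (k+1) (na ++ [(b.1, (none : Option Int))] ++ [b]) (nl ++ [(0:Int)]) b.1 (by simp)]
        have hpa : padA prev (b::r) = (b.1, none) :: b :: padA b.1 r := by simp [padA, h]
        have hplb : padLB prev (b::r) (lengths.drop k) = 0 :: padLB b.1 r (lengths.drop (k+1)) := by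
          rw [hdrop, hdrop1]; simp [padLB, h]
        simp [hpa, hplb]

theorem padTop (a : Option Int × Option Int) (rest : List (Option Int × Option Int)) (lengths : List Int) :
    add_padder_actions_and_lens (a :: rest) lengths
      = add_padder_actions_and_lens_alt (a :: rest) lengths := by
  unfold add_padder_actions_and_lens add_padder_actions_and_lens_alt
  have hA := loopA rest [] a [a] (lengths.take 1) (lengths.drop 1)
    (fun _ => by simp [List.length_take])
    (fun hne => by
      have : 1 < lengths.length := by
        by_contra hc
        exact hne (List.drop_eq_nil_of_le (by omega))
      simp [List.length_take]; omega)
  simp only [List.take_append_drop, List.length_nil, List.nil_append, List.singleton_append,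
    List.length_cons, Nat.cast_zero, zero_add, Nat.cast_one] at hA
  have hnl0 : (if (0:Int) < (lengths.length : Int) then [PySem.List.pyGetD lengths 0 (0:Int)] else ([] : List Int)) = lengths.take 1 := by
    cases lengths with
    | nil => simp
    | cons l t => simp [PySem.List.pyGetD_zero_cons]
  have hB := loopB lengths rest 1 [a] (lengths.take 1) a.1 (by simp)
  rw [PySem.List.enumerate_cons, List.foldl_cons]
  simp only [ne_eq, not_true_eq_false, false_and, if_false, List.nil_append]
  simp only [zero_add, hnl0]
  simp only [ne_eq] at hA hB
  simp only [List.length_cons]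
  rw [PySem.List.slice_from_natCast]
  push_cast at hA hB ⊢
  ring_nf at hA hB ⊢
  rw [hA, hB]
  simp [padL_eq_padLB]
  omega

-- ===== VERDICT (by name: the statement is the Claim_ definition above) =====
theorem add_padder_actions_and_lens_spec : Claim_equal_add_padder_actions_and_lens := by
  intro actions lengths _
  show add_padder_actions_and_lens actions lengths = add_padder_actions_and_lens_alt actions lengths
  cases actions with
  | nil =>
    unfold add_padder_actions_and_lens add_padder_actions_and_lens_alt
    rw [show ((List.length ([] : List (Option Int × Option Int))) : Int) = 0 by simp]
    rw [PySem.List.pyRange_one_eq_nil (by norm_num)]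
    simp [PySem.List.slice_none_none]
  | cons a rest => exact padTop a rest lengths
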